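-- pv_equiv track=rewrite | github.com/huggin/gfg | misc/wifi_range.py | wifiRange
-- ===== SOURCE A (Python) =====
-- def wifiRange(N, S, X):
--     # code here
--     a = []
--     for i in range(N):
--         if S[i] == "1":
--             a.append((i - X, i + X))
--
--     if len(a) == 0 or a[0][0] > 0 or a[-1][1] < N - 1:
--         return 0
--     for i in range(1, len(a)):
--         if a[i][0] > a[i - 1][1] + 1:
--             return 0
--
--     return 1
-- ===== SOURCE B (Python) =====
-- def wifiRange(N, S, X):
--     # Coverage sweep with a difference array instead of interval-gap checks.
--     diff = [0] * (N + 1)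
--     routers = 0
--     for p in range(N):
--         if S[p] == "1":
--             routers += 1
--             l = max(0, p - X)
--             r = min(N - 1, p + X)
--             if l <= r:
--                 diff[l] += 1
--                 diff[r + 1] -= 1
--     if routers == 0:
--         return 0
--     cov = 0
--     for h in range(N):
--         cov += diff[h]
--         if cov == 0:
--             return 0
--     return 1
-- ===== Notes on version B (the rewrite author's own statement) =====
-- stated objective: alternative
-- what changed: A collects router intervals and checks first/last bounds plus pairwise gaps between consecutive intervals; B instead marks each router's clamped coverage in a difference array and takes a running prefix sum over the houses, accepting iff there is a router and every house's coverage count is positive.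
import Mathlib
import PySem

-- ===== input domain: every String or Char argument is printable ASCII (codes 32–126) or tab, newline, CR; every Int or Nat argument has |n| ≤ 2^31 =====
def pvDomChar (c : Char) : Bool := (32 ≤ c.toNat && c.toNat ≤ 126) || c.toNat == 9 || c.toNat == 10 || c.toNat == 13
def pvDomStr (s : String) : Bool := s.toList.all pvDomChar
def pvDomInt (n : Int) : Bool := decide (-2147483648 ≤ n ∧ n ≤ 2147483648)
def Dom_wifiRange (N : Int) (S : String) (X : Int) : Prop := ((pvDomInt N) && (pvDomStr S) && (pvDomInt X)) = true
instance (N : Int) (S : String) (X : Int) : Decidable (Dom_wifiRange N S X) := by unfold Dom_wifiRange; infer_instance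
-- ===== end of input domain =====

-- B replaces A's interval-gap scan by a difference-array coverage sweep over the houses (alternative algorithm, same O(N) cost).

-- ===== PORT A =====
def wifiRange (N : Int) (S : String) (X : Int) : Int :=
  let a := (PySem.List.pyRange 0 N 1).foldl
    (fun acc i => if PySem.Str.pyGet? S i = some '1' then acc ++ [(i - X, i + X)] else acc) []
  if a.length = 0 ∨ (PySem.List.pyGetD a 0 (0, 0)).1 > 0 ∨ (PySem.List.pyGetD a (-1) (0, 0)).2 < N - 1 then 0
  else if (PySem.List.pyRange 1 (a.length : Int) 1).any
      (fun i => decide ((PySem.List.pyGetD a i (0, 0)).1 > (PySem.List.pyGetD a (i - 1) (0, 0)).2 + 1)) then 0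
  else 1

-- ===== PORT B =====
def wifiRange_alt (N : Int) (S : String) (X : Int) : Int :=
  let st := (PySem.List.pyRange 0 N 1).foldl
    (fun (st : Int × List Int) p =>
      if PySem.Str.pyGet? S p = some '1' then
        let l := max 0 (p - X)
        let r := min (N - 1) (p + X)
        if l ≤ r then
          let d1 := PySem.List.pySetD st.2 l (PySem.List.pyGetD st.2 l 0 + 1)
          let d2 := PySem.List.pySetD d1 (r + 1) (PySem.List.pyGetD d1 (r + 1) 0 - 1)
          (st.1 + 1, d2)
        else (st.1 + 1, st.2)
      else st)
    (0, List.replicate (N + 1).toNat 0)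
  if st.1 = 0 then 0
  else
    let fin := (PySem.List.pyRange 0 N 1).foldl
      (fun (c : Int × Bool) h =>
        let cov := c.1 + PySem.List.pyGetD st.2 h 0
        (cov, c.2 && decide (cov ≠ 0))) (0, true)
    if fin.2 then 1 else 0

-- ===== PRECONDITION & SPEC =====
-- Pre_ excludes exactly the inputs where Python A raises IndexError: the loop reads S[i] for every i < N,
-- so A raises iff N exceeds the length of S.
def Pre_wifiRange (N : Int) (S : String) (X : Int) : Prop := N ≤ PySem.Str.len S
instance (N : Int) (S : String) (X : Int) : Decidable (Pre_wifiRange N S X) := by unfold Pre_wifiRange; infer_instance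
def pvWitness_wifiRange : Int × String × Int := (5, "10101", 1)
def Spec_wifiRange (N : Int) (S : String) (X : Int) (out : Int) : Prop := out = wifiRange_alt N S X
instance (N : Int) (S : String) (X : Int) (out : Int) : Decidable (Spec_wifiRange N S X out) := by unfold Spec_wifiRange; infer_instance

-- ===== CLAIM (what is proved, stated in full; the proofs are below) =====
def Claim_equal_wifiRange : Prop := ∀ (N : Int) (S : String) (X : Int), Dom_wifiRange N S X → Pre_wifiRange N S X → Spec_wifiRange N S X (wifiRange N S X)

-- ===== LEMMAS AND PROOFS =====

/-- The router positions: indices `0 ≤ i < N` with `S[i] = '1'`. -/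
def wfPos (N : Int) (S : String) : List Int :=
  (PySem.List.pyRange 0 N 1).filter (fun i => decide (PySem.Str.pyGet? S i = some '1'))

/-- Structural "no gap between consecutive router intervals" predicate on positions. -/
def chainOk (X : Int) : List Int → Prop
  | [] => True
  | [_] => True
  | p :: q :: rest => (q - X ≤ p + X + 1) ∧ chainOk X (q :: rest)

/-- The same predicate on A's interval pairs. -/
def pairChain : List (Int × Int) → Prop
  | [] => True
  | [_] => True
  | p :: q :: rest => (q.1 ≤ p.2 + 1) ∧ pairChain (q :: rest)

/-- "There is a router and every house 0..N-1 is within X of some router." -/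
def Covers (N : Int) (S : String) (X : Int) : Prop :=
  wfPos N S ≠ [] ∧ ∀ h : Int, 0 ≤ h → h < N → ∃ q ∈ wfPos N S, q - X ≤ h ∧ h ≤ q + X

/-- A's structural acceptance condition. -/
def CondA (N : Int) (S : String) (X : Int) : Prop :=
  wfPos N S ≠ [] ∧ ((wfPos N S).headI - X ≤ 0) ∧
    (N - 1 ≤ (wfPos N S).getLastI + X) ∧ chainOk X (wfPos N S)

theorem foldl_filter_append {α β : Type} (P : α → Prop) [DecidablePred P] (f : α → β) :
    ∀ (L : List α) (acc : List β),
      L.foldl (fun acc i => if P i then acc ++ [f i] else acc) acc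
        = acc ++ (L.filter (fun i => decide (P i))).map f := by
  intro L
  induction L with
  | nil => simp
  | cons x t ih =>
    intro acc
    by_cases hx : P x <;> simp [List.foldl_cons, hx, ih]

theorem pairChain_iff_getElem (l : List (Int × Int)) :
    pairChain l ↔ ∀ j (h : j + 1 < l.length), (l[j + 1]).1 ≤ (l[j]).2 + 1 := by
  induction l with
  | nil => simp [pairChain]
  | cons p t ih =>
    cases t with
    | nil => simp [pairChain]
    | cons q r =>
      constructor
      · rintro ⟨h1, h2⟩ j hj
        cases j with
        | zero => simpa using h1
        | succ j' =>
          have := (ih.mp h2) j' (by simpa using hj)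
          simpa using this
      · intro hall
        refine ⟨by simpa using hall 0 (by simp), ih.mpr ?_⟩
        intro j hj
        have := hall (j + 1) (by simpa using hj)
        simpa using this

theorem any_adj (l : List (Int × Int)) :
    ((PySem.List.pyRange 1 (l.length : Int) 1).any
      (fun i => decide ((PySem.List.pyGetD l i (0, 0)).1 > (PySem.List.pyGetD l (i - 1) (0, 0)).2 + 1))) = false
      ↔ pairChain l := by
  rw [List.any_eq_false, pairChain_iff_getElem]
  constructor
  · intro hall j hj
    have hmem : ((j : Int) + 1) ∈ PySem.List.pyRange 1 (l.length : Int) 1 := by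
      rw [PySem.List.mem_pyRange_one]; omega
    have := hall _ hmem
    rw [PySem.List.pyGetD_eq_getElem l (0,0) (by omega) (by push_cast; omega)] at this
    rw [show ((j : Int) + 1 - 1) = (j : Int) by ring] at this
    rw [PySem.List.pyGetD_eq_getElem l (0,0) (by omega) (by push_cast; omega)] at this
    simp only [decide_eq_true_eq, not_lt] at this
    simpa using this
  · intro hall i hmem
    rw [PySem.List.mem_pyRange_one] at hmem
    obtain ⟨h1, h2⟩ := hmem
    obtain ⟨j, hj, hi⟩ : ∃ j : Nat, j + 1 < l.length ∧ i = ((j + 1 : Nat) : Int) :=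
      ⟨i.toNat - 1, by omega, by omega⟩
    rw [hi, show (((j + 1 : Nat) : Int) - 1) = ((j : Nat) : Int) by push_cast; ring]
    simp only [PySem.List.pyGetD_natCast, decide_eq_true_eq, not_lt]
    rw [List.getD_eq_getElem l (0,0) hj, List.getD_eq_getElem l (0,0) (by omega)]
    exact hall j hj

theorem pairChain_map (X : Int) (Q : List Int) :
    pairChain (Q.map (fun q => (q - X, q + X))) ↔ chainOk X Q := by
  induction Q with
  | nil => simp [pairChain, chainOk]
  | cons q0 t ih =>
    cases t with
    | nil => simp [pairChain, chainOk]
    | cons q1 r =>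
      simp only [List.map_cons, pairChain, chainOk]
      constructor
      · rintro ⟨h1, h2⟩
        exact ⟨by omega, (ih).mp (by simpa [pairChain] using h2)⟩
      · rintro ⟨h1, h2⟩
        exact ⟨by omega, by simpa [pairChain] using (ih).mpr h2⟩

theorem A_eq_one_iff (N : Int) (S : String) (X : Int) :
    wifiRange N S X = 1 ↔ CondA N S X := by
  unfold wifiRange
  rw [foldl_filter_append (fun i => PySem.Str.pyGet? S i = some '1') (fun i => (i - X, i + X))]
  dsimp only
  rw [List.nil_append,
    show (PySem.List.pyRange 0 N 1).filter (fun i => decide (PySem.Str.pyGet? S i = some '1')) = wfPos N S from rfl]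
  unfold CondA
  cases hq : wfPos N S with
  | nil =>
    rw [if_pos (by simp)]
    constructor
    · intro h; exact absurd h (by norm_num)
    · rintro ⟨hne, -⟩; exact absurd rfl hne
  | cons q0 qs =>
    have hne : (q0 :: qs : List Int) ≠ [] := List.cons_ne_nil _ _
    have hmapne : (q0 :: qs).map (fun q => (q - X, q + X)) ≠ [] := by simp
    have hhead : PySem.List.pyGetD ((q0 :: qs).map (fun q => (q - X, q + X))) 0 (0, 0)
        = ((q0 :: qs).headI - X, (q0 :: qs).headI + X) := by
      simp [PySem.List.pyGetD_zero_cons]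
    have hlast : PySem.List.pyGetD ((q0 :: qs).map (fun q => (q - X, q + X))) (-1) (0, 0)
        = ((q0 :: qs).getLastI - X, (q0 :: qs).getLastI + X) := by
      rw [PySem.List.pyGetD_neg_one _ _ hmapne, List.getLast_map,
        show (q0 :: qs).getLastI = (q0 :: qs).getLast hne by
          simp [List.getLastI_eq_getLast?, List.getLast?_eq_getLast hne]]
    by_cases hcond : ((q0 :: qs).map (fun q => (q - X, q + X))).length = 0 ∨
        (PySem.List.pyGetD ((q0 :: qs).map (fun q => (q - X, q + X))) 0 (0, 0)).1 > 0 ∨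
        (PySem.List.pyGetD ((q0 :: qs).map (fun q => (q - X, q + X))) (-1) (0, 0)).2 < N - 1
    · rw [if_pos hcond]
      constructor
      · intro h0; exact absurd h0 (by norm_num)
      · rintro ⟨-, hh, hl, -⟩
        rcases hcond with h | h | h
        · simp at h
        · rw [hhead] at h; dsimp only at h; omega
        · rw [hlast] at h; dsimp only at h; omega
    · rw [if_neg hcond]
      push_neg at hcond
      obtain ⟨-, hh, hl⟩ := hcond
      rw [hhead] at hh; rw [hlast] at hl
      dsimp only at hh hl
      
      cases hany : ((PySem.List.pyRange 1 (((q0 :: qs).map (fun q => (q - X, q + X))).length : Int) 1).any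
          (fun i => decide ((PySem.List.pyGetD ((q0 :: qs).map (fun q => (q - X, q + X))) i (0, 0)).1 >
            (PySem.List.pyGetD ((q0 :: qs).map (fun q => (q - X, q + X))) (i - 1) (0, 0)).2 + 1))) with
      | true =>
        rw [if_pos rfl]
        constructor
        · intro h0; exact absurd h0 (by norm_num)
        · rintro ⟨-, -, -, hchain⟩
          have : pairChain ((q0 :: qs).map (fun q => (q - X, q + X))) := (pairChain_map X _).mpr hchain
          rw [← any_adj] at this
          rw [this] at hany
          exact absurd hany (by norm_num)
      | false =>
        rw [if_neg Bool.false_ne_true]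
        have hchain : chainOk X (q0 :: qs) := (pairChain_map X _).mp ((any_adj _).mp hany)
        exact ⟨fun _ => ⟨hne, by omega, by omega, hchain⟩, fun _ => rfl⟩

/-- B's first loop, as a named step function (definitionally the lambda in `wifiRange_alt`). -/
def stepB (N : Int) (S : String) (X : Int) : (Int × List Int) → Int → (Int × List Int) :=
  fun st p =>
    if PySem.Str.pyGet? S p = some '1' then
      let l := max 0 (p - X)
      let r := min (N - 1) (p + X)
      if l ≤ r then
        let d1 := PySem.List.pySetD st.2 l (PySem.List.pyGetD st.2 l 0 + 1)
        let d2 := PySem.List.pySetD d1 (r + 1) (PySem.List.pyGetD d1 (r + 1) 0 - 1)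
        (st.1 + 1, d2)
      else (st.1 + 1, st.2)
    else st

theorem altB_eq (N : Int) (S : String) (X : Int) :
    wifiRange_alt N S X =
      (let st := (PySem.List.pyRange 0 N 1).foldl (stepB N S X) (0, List.replicate (N + 1).toNat 0)
       if st.1 = 0 then 0
       else
         let fin := (PySem.List.pyRange 0 N 1).foldl
           (fun (c : Int × Bool) h =>
             let cov := c.1 + PySem.List.pyGetD st.2 h 0
             (cov, c.2 && decide (cov ≠ 0))) (0, true)
         if fin.2 then 1 else 0) := rfl

theorem sumTakeSet (d : List Int) (v : Int) :
    ∀ (i k : Nat) (hi : i < d.length),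
      ((d.set i (d[i] + v)).take k).sum = (d.take k).sum + if i < k then v else 0 := by
  induction d with
  | nil => intro i k hi; simp at hi
  | cons x t ih =>
    intro i k hi
    cases k with
    | zero => simp
    | succ k' =>
      cases i with
      | zero =>
        simp only [List.getElem_cons_zero, List.set_cons_zero, List.take_succ_cons, List.sum_cons]
        have : (0 : Nat) < k' + 1 := Nat.succ_pos _
        rw [if_pos this]; ring
      | succ i' =>
        simp only [List.getElem_cons_succ, List.set_cons_succ, List.take_succ_cons, List.sum_cons]
        rw [ih i' k' (by simpa using hi)]
        by_cases h : i' < k'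
        · rw [if_pos h, if_pos (by omega)]; ring
        · rw [if_neg h, if_neg (by omega)]; ring

theorem sum_take_succ_getD (d : List Int) (k : Nat) :
    (d.take (k + 1)).sum = (d.take k).sum + d.getD k 0 := by
  rw [List.take_succ, List.sum_append]
  congr 1
  cases h : d[k]? <;> simp [List.getD_eq_getElem?_getD, h]

theorem fold1_inv (N : Int) (S : String) (X : Int) (hN : 0 ≤ N) :
    ∀ (m : Nat), (m : Int) ≤ N →
      ((PySem.List.pyRange 0 (m : Int) 1).foldl (stepB N S X)
          (0, List.replicate (N + 1).toNat 0)).2.length = (N + 1).toNat ∧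
      ((PySem.List.pyRange 0 (m : Int) 1).foldl (stepB N S X)
          (0, List.replicate (N + 1).toNat 0)).1 = ((wfPos (m : Int) S).length : Int) ∧
      ∀ h : Int, 0 ≤ h → h < N →
        ((((PySem.List.pyRange 0 (m : Int) 1).foldl (stepB N S X)
            (0, List.replicate (N + 1).toNat 0)).2.take (h.toNat + 1)).sum
          = (((wfPos (m : Int) S).filter
              (fun q => decide (q - X ≤ h ∧ h ≤ q + X))).length : Int)) := by
  intro m
  induction m with
  | zero =>
    intro _
    rw [PySem.List.pyRange_one_eq_nil (by omega)]
    refine ⟨by simp, by simp [wfPos, PySem.List.pyRange_one_eq_nil], ?_⟩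
    intro h h0 hN'
    simp [wfPos, PySem.List.pyRange_one_eq_nil, List.take_replicate]
  | succ m' ih =>
    intro hm
    have hm' : (m' : Int) ≤ N := by push_cast at hm ⊢; omega
    obtain ⟨hlen, hcnt, hsum⟩ := ih hm'
    have hsplit : PySem.List.pyRange 0 ((m' + 1 : Nat) : Int) 1
        = PySem.List.pyRange 0 (m' : Int) 1 ++ [(m' : Int)] := by
      push_cast
      rw [PySem.List.pyRange_one_succ_right (by omega)]
    have hposplit : wfPos ((m' + 1 : Nat) : Int) S
        = wfPos (m' : Int) S
          ++ List.filter (fun i => decide (PySem.Str.pyGet? S i = some '1')) [(m' : Int)] := by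
      unfold wfPos; rw [hsplit, List.filter_append]
    rw [hsplit, List.foldl_append, List.foldl_cons, List.foldl_nil, hposplit]
    set R := (PySem.List.pyRange 0 (m' : Int) 1).foldl (stepB N S X)
      (0, List.replicate (N + 1).toNat 0) with hR
    have hmlt : (m' : Int) < N := by push_cast at hm; omega
    by_cases hc : PySem.Str.pyGet? S (m' : Int) = some '1'
    · -- router at m'
      have hfil : List.filter (fun i => decide (PySem.Str.pyGet? S i = some '1')) [(m' : Int)]
          = [(m' : Int)] := by
        rw [List.filter_cons, if_pos (decide_eq_true hc)]; rfl
      rw [hfil]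
      set l := max 0 ((m' : Int) - X) with hldef
      set r := min (N - 1) ((m' : Int) + X) with hrdef
      have hl0 : 0 ≤ l := le_max_left _ _
      have hrN : r ≤ N - 1 := min_le_left _ _
      have hlm : (m' : Int) - X ≤ l := le_max_right _ _
      have hrm : r ≤ (m' : Int) + X := min_le_right _ _
      by_cases hlr : l ≤ r
      · have hlN : l < (R.2.length : Int) := by rw [hlen]; omega
        have hrN' : r + 1 < ((R.2.set l.toNat (R.2[l.toNat]'(by omega) + 1)).length : Int) := by
          rw [List.length_set, hlen]; omega
        have hstep : stepB N S X R (m' : Int)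
            = (R.1 + 1,
                (R.2.set l.toNat (R.2[l.toNat]'(by omega) + 1)).set (r + 1).toNat
                  ((R.2.set l.toNat (R.2[l.toNat]'(by omega) + 1))[(r + 1).toNat]'(by omega) + (-1))) := by
          unfold stepB
          rw [if_pos hc]
          dsimp only
          rw [← hldef, ← hrdef, if_pos hlr]
          rw [PySem.List.pySetD_of_nonneg _ _ hl0,
            PySem.List.pyGetD_eq_getElem _ _ hl0 hlN,
            PySem.List.pySetD_of_nonneg _ _ (by omega : (0:Int) ≤ r + 1),
            PySem.List.pyGetD_eq_getElem _ _ (by omega : (0:Int) ≤ r + 1) hrN',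
            sub_eq_add_neg]
        rw [hstep]
        refine ⟨by simp [List.length_set, hlen], ?_, ?_⟩
        · dsimp only
          rw [hcnt, List.length_append]
          simp only [List.length_cons, List.length_nil]
          omega
        · intro h h0 hN'
          dsimp only
          rw [sumTakeSet _ (-1) (r + 1).toNat (h.toNat + 1) (by rw [List.length_set]; omega),
            sumTakeSet _ 1 l.toNat (h.toNat + 1) (by omega),
            hsum h h0 hN', List.filter_append, List.length_append]
          by_cases hcov : ((m' : Int) - X ≤ h ∧ h ≤ (m' : Int) + X)
          · have hlh : l ≤ h := max_le h0 hcov.1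
            have hrh : h ≤ r := le_min (by omega) hcov.2
            rw [if_pos (by omega), if_neg (by omega)]
            have : List.filter (fun q => decide (q - X ≤ h ∧ h ≤ q + X)) [(m' : Int)]
                = [(m' : Int)] := by
              rw [List.filter_cons, if_pos (decide_eq_true hcov)]; rfl
            rw [this]
            simp only [List.length_cons, List.length_nil]
            omega
          · have hnil : List.filter (fun q => decide (q - X ≤ h ∧ h ≤ q + X)) [(m' : Int)]
                = [] := by
              rw [List.filter_cons, if_neg (by simp only [decide_eq_true_eq]; exact hcov)]; rfl
            rw [hnil]
            simp only [List.length_nil]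
            by_cases hA : l ≤ h
            · have hB : r < h := by
                by_contra hB'
                push_neg at hB'
                exact hcov ⟨by omega, by omega⟩
              rw [if_pos (by omega), if_pos (by omega)]
              omega
            · rw [if_neg (by omega), if_neg (by omega)]
              omega
      · -- empty interval: skip
        have hstep : stepB N S X R (m' : Int) = (R.1 + 1, R.2) := by
          unfold stepB
          rw [if_pos hc]
          dsimp only
          rw [← hldef, ← hrdef, if_neg hlr]
        rw [hstep]
        refine ⟨hlen, ?_, ?_⟩
        · dsimp only
          rw [hcnt, List.length_append]
          simp only [List.length_cons, List.length_nil]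
          omega
        · intro h h0 hN'
          dsimp only
          rw [hsum h h0 hN', List.filter_append, List.length_append]
          have hnil : List.filter (fun q => decide (q - X ≤ h ∧ h ≤ q + X)) [(m' : Int)] = [] := by
            have hfalse : ¬((m' : Int) - X ≤ h ∧ h ≤ (m' : Int) + X) := by
              rintro ⟨c1, c2⟩
              exact absurd (le_trans (max_le h0 c1) (le_min (by omega) c2)) hlr
            rw [List.filter_cons, if_neg (by simp only [decide_eq_true_eq]; exact hfalse)]; rfl
          rw [hnil]
          simp only [List.length_nil]
          omega
    · -- no router at m'
      have hstep : stepB N S X R (m' : Int) = R := by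
        unfold stepB; rw [if_neg hc]
      have hfil : List.filter (fun i => decide (PySem.Str.pyGet? S i = some '1')) [(m' : Int)]
          = [] := by
        rw [List.filter_cons, if_neg (by simp only [decide_eq_true_eq]; exact hc)]; rfl
      rw [hstep, hfil, List.append_nil]
      exact ⟨hlen, hcnt, hsum⟩

theorem fold2_inv (d : List Int) :
    ∀ (m : Nat),
      ((PySem.List.pyRange 0 (m : Int) 1).foldl
          (fun (c : Int × Bool) h =>
            let cov := c.1 + PySem.List.pyGetD d h 0
            (cov, c.2 && decide (cov ≠ 0))) (0, true)).1 = (d.take m).sum ∧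
      (((PySem.List.pyRange 0 (m : Int) 1).foldl
          (fun (c : Int × Bool) h =>
            let cov := c.1 + PySem.List.pyGetD d h 0
            (cov, c.2 && decide (cov ≠ 0))) (0, true)).2 = true
        ↔ ∀ k : Nat, k < m → (d.take (k + 1)).sum ≠ 0) := by
  intro m
  induction m with
  | zero =>
    rw [PySem.List.pyRange_one_eq_nil (by omega)]
    exact ⟨by simp, by simp⟩
  | succ m' ih =>
    obtain ⟨h1, h2⟩ := ih
    have hsplit : PySem.List.pyRange 0 ((m' + 1 : Nat) : Int) 1
        = PySem.List.pyRange 0 (m' : Int) 1 ++ [(m' : Int)] := by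
      push_cast
      rw [PySem.List.pyRange_one_succ_right (by omega)]
    rw [hsplit, List.foldl_append, List.foldl_cons, List.foldl_nil]
    dsimp only
    rw [PySem.List.pyGetD_natCast, h1, ← sum_take_succ_getD]
    refine ⟨rfl, ?_⟩
    rw [Bool.and_eq_true, h2, decide_eq_true_eq]
    constructor
    · rintro ⟨hall, hlast⟩ k hk
      rcases Nat.lt_or_ge k m' with h | h
      · exact hall k h
      · have : k = m' := by omega
        subst this; exact hlast
    · intro hall
      exact ⟨fun k hk => hall k (by omega), hall m' (by omega)⟩

theorem B_eq_one_iff (N : Int) (S : String) (X : Int) :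
    wifiRange_alt N S X = 1 ↔ Covers N S X := by
  rw [altB_eq]
  rcases Int.lt_or_le N 0 with hN | hN
  · rw [PySem.List.pyRange_one_eq_nil (by omega)]
    dsimp only [List.foldl_nil]
    rw [if_pos rfl]
    constructor
    · intro h; exact absurd h (by norm_num)
    · rintro ⟨hne, -⟩
      exact absurd (by unfold wfPos; rw [PySem.List.pyRange_one_eq_nil (by omega)]; rfl) hne
  · have hcast : ((N.toNat : Nat) : Int) = N := Int.toNat_of_nonneg hN
    obtain ⟨hlen, hcnt, hsum⟩ := fold1_inv N S X hN N.toNat (by omega)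
    rw [hcast] at hlen hcnt hsum
    dsimp only
    rw [hcnt]
    by_cases hne : wfPos N S = []
    · rw [if_pos (by rw [hne]; rfl)]
      constructor
      · intro h; exact absurd h (by norm_num)
      · rintro ⟨hne', -⟩; exact absurd hne hne'
    · rw [if_neg (by
        simp only [ne_eq, Int.natCast_eq_zero, List.length_eq_zero_iff]
        exact hne)]
      set D := ((PySem.List.pyRange 0 N 1).foldl (stepB N S X)
        (0, List.replicate (N + 1).toNat 0)).2 with hD
      obtain ⟨-, hflag⟩ := fold2_inv D N.toNat
      rw [hcast] at hflag
      have hbridge : (∀ k : Nat, k < N.toNat → (D.take (k + 1)).sum ≠ 0)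
          ↔ (∀ h : Int, 0 ≤ h → h < N → ∃ q ∈ wfPos N S, q - X ≤ h ∧ h ≤ q + X) := by
        constructor
        · intro hall h h0 hN'
          have hk : h.toNat < N.toNat := by omega
          have := hall h.toNat hk
          rw [hsum h h0 hN'] at this
          have hlenne : ((wfPos N S).filter (fun q => decide (q - X ≤ h ∧ h ≤ q + X))).length ≠ 0 := by
            intro hz; rw [hz] at this; exact this (by norm_num)
          have hfilne : (wfPos N S).filter (fun q => decide (q - X ≤ h ∧ h ≤ q + X)) ≠ [] := by
            intro hz; rw [hz] at hlenne; exact hlenne rfl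
          obtain ⟨q, hq⟩ := List.exists_mem_of_ne_nil _ hfilne
          rw [List.mem_filter] at hq
          exact ⟨q, hq.1, by simpa using hq.2⟩
        · intro hall k hk
          have h0 : (0 : Int) ≤ (k : Int) := by omega
          have hN' : (k : Int) < N := by omega
          rw [show (k + 1 : Nat) = (((k : Int)).toNat + 1) from by omega]
          rw [hsum (k : Int) h0 hN']
          obtain ⟨q, hq, c1, c2⟩ := hall (k : Int) h0 hN'
          have : q ∈ (wfPos N S).filter (fun q => decide (q - X ≤ (k : Int) ∧ (k : Int) ≤ q + X)) := by
            rw [List.mem_filter]; exact ⟨hq, by simp [c1, c2]⟩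
          have hpos : 0 < ((wfPos N S).filter
              (fun q => decide (q - X ≤ (k : Int) ∧ (k : Int) ≤ q + X))).length :=
            List.length_pos_of_mem this
          simp only [ne_eq, Int.natCast_eq_zero]
          omega
      constructor
      · intro h1
        refine ⟨hne, ?_⟩
        by_cases hf : ((PySem.List.pyRange 0 N 1).foldl
            (fun (c : Int × Bool) h =>
              let cov := c.1 + PySem.List.pyGetD D h 0
              (cov, c.2 && decide (cov ≠ 0))) (0, true)).2 = true
        · exact hbridge.mp (hflag.mp hf)
        · rw [if_neg hf] at h1
          exact absurd h1 (by norm_num)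
      · rintro ⟨-, hcov⟩
        rw [if_pos (hflag.mpr (hbridge.mpr hcov))]

theorem wfPos_sorted (N : Int) (S : String) : (wfPos N S).Pairwise (· < ·) :=
  (PySem.List.pairwise_lt_pyRange_one 0 N).filter _

theorem wfPos_mem {N : Int} {S : String} {q : Int} (h : q ∈ wfPos N S) : 0 ≤ q ∧ q < N := by
  unfold wfPos at h
  rw [List.mem_filter] at h
  have := (PySem.List.mem_pyRange_one).mp h.1
  omega

theorem getLastI_cons_cons (a b : Int) (r : List Int) :
    (a :: b :: r).getLastI = (b :: r).getLastI := by
  simp [List.getLastI_eq_getLast?, List.getLast?_cons_cons]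

theorem sorted_headI_le {Q : List Int} (hs : Q.Pairwise (· < ·)) {q : Int} (hq : q ∈ Q) :
    Q.headI ≤ q := by
  cases Q with
  | nil => cases hq
  | cons a t =>
    rcases List.mem_cons.mp hq with h | h
    · simp [h]
    · have := (List.pairwise_cons.mp hs).1 q h
      simp; omega

theorem sorted_le_getLastI {Q : List Int} (hs : Q.Pairwise (· < ·)) {q : Int} (hq : q ∈ Q) :
    q ≤ Q.getLastI := by
  induction Q with
  | nil => cases hq
  | cons a t ih =>
    cases t with
    | nil =>
      rcases List.mem_cons.mp hq with h | h
      · simp [h, List.getLastI]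
      · cases h
    | cons b r =>
      rw [getLastI_cons_cons]
      rcases List.mem_cons.mp hq with h | h
      · subst h
        have hmem : (b :: r).getLastI ∈ b :: r := by
          rw [show (b :: r).getLastI = (b :: r).getLast (List.cons_ne_nil _ _) by
            simp [List.getLastI_eq_getLast?, List.getLast?_eq_getLast]]
          exact List.getLast_mem _
        have := (List.pairwise_cons.mp hs).1 _ hmem
        omega
      · exact ih (List.Pairwise.of_cons hs) h

theorem chain_cover (X : Int) (qs : List Int) : ∀ (q0 : Int), chainOk X (q0 :: qs) →
    ∀ hh : Int, q0 - X ≤ hh → hh ≤ (q0 :: qs).getLastI + X →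
      ∃ q ∈ q0 :: qs, q - X ≤ hh ∧ hh ≤ q + X := by
  induction qs with
  | nil =>
    intro q0 _ hh h1 h2
    exact ⟨q0, List.mem_cons_self, h1, by simpa [List.getLastI] using h2⟩
  | cons q1 t ih =>
    intro q0 hc hh h1 h2
    by_cases hcase : hh ≤ q0 + X
    · exact ⟨q0, List.mem_cons_self, h1, hcase⟩
    · obtain ⟨hgap, hc'⟩ := hc
      have h2' : hh ≤ (q1 :: t).getLastI + X := by rwa [getLastI_cons_cons] at h2
      obtain ⟨q, hq, ha, hb⟩ := ih q1 hc' hh (by omega) h2'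
      exact ⟨q, List.mem_cons_of_mem _ hq, ha, hb⟩

theorem chainOk_iff_getElem (X : Int) (l : List Int) :
    chainOk X l ↔ ∀ j (h : j + 1 < l.length), l[j + 1] - X ≤ l[j] + X + 1 := by
  induction l with
  | nil => simp [chainOk]
  | cons p t ih =>
    cases t with
    | nil => simp [chainOk]
    | cons q r =>
      constructor
      · rintro ⟨h1, h2⟩ j hj
        cases j with
        | zero => simpa using h1
        | succ j' =>
          have := (ih.mp h2) j' (by simpa using hj)
          simpa using this
      · intro hall
        refine ⟨by simpa using hall 0 (by simp), ih.mpr ?_⟩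
        intro j hj
        have := hall (j + 1) (by simpa using hj)
        simpa using this

theorem CondA_iff (N : Int) (S : String) (X : Int) : CondA N S X ↔ Covers N S X := by
  unfold CondA Covers
  have hs := wfPos_sorted N S
  constructor
  · rintro ⟨hne, hh, hl, hc⟩
    refine ⟨hne, ?_⟩
    intro h h0 hN
    obtain ⟨q0, qs, hq⟩ := List.exists_cons_of_ne_nil hne
    rw [hq] at hc hh hl ⊢
    simp only [List.headI_cons] at hh
    exact chain_cover X qs q0 hc h (by omega) (by omega)
  · rintro ⟨hne, hcov⟩
    have hbounds : ∀ q ∈ wfPos N S, 0 ≤ q ∧ q < N := fun q hq => wfPos_mem hq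
    have hNpos : 0 < N := by
      obtain ⟨q, hq⟩ := List.exists_mem_of_ne_nil _ hne
      have := hbounds q hq; omega
    refine ⟨hne, ?_, ?_, ?_⟩
    · obtain ⟨q, hq, c1, c2⟩ := hcov 0 le_rfl hNpos
      have := sorted_headI_le hs hq; omega
    · obtain ⟨q, hq, c1, c2⟩ := hcov (N - 1) (by omega) (by omega)
      have := sorted_le_getLastI hs hq; omega
    · rw [chainOk_iff_getElem]
      intro j hj
      by_contra hgap
      push_neg at hgap
      have hmem_j : (wfPos N S)[j]'(by omega) ∈ wfPos N S := List.getElem_mem _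
      have hmem_j1 : (wfPos N S)[j + 1]'hj ∈ wfPos N S := List.getElem_mem _
      have hbj := hbounds _ hmem_j
      have hbj1 := hbounds _ hmem_j1
      obtain ⟨q', hq', d1, d2⟩ := hcov ((wfPos N S)[j]'(by omega)) hbj.1 hbj.2
      have hX : 0 ≤ X := by omega
      obtain ⟨q, hq, c1, c2⟩ := hcov ((wfPos N S)[j]'(by omega) + X + 1) (by omega) (by omega)
      obtain ⟨i, hi, hqi⟩ := List.mem_iff_getElem.mp hq
      subst hqi
      have hsorted := List.pairwise_iff_getElem.mp hs
      rcases Nat.lt_or_ge j i |>.symm with hij | hij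
      · have hle : (wfPos N S)[i]'hi ≤ (wfPos N S)[j]'(by omega) := by
          rcases eq_or_lt_of_le hij with h | h
          · subst h; exact le_refl _
          · exact le_of_lt (hsorted i j hi (by omega) h)
        omega
      · have hge : (wfPos N S)[j + 1]'hj ≤ (wfPos N S)[i]'hi := by
          rcases eq_or_lt_of_le (Nat.succ_le_of_lt hij) with h | h
          · subst h; exact le_refl _
          · exact le_of_lt (hsorted (j + 1) i hj hi h)
        omega

theorem A_zero_or_one (N : Int) (S : String) (X : Int) :
    wifiRange N S X = 0 ∨ wifiRange N S X = 1 := by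
  unfold wifiRange
  dsimp only
  split
  · exact Or.inl rfl
  · split
    · exact Or.inl rfl
    · exact Or.inr rfl

theorem B_zero_or_one (N : Int) (S : String) (X : Int) :
    wifiRange_alt N S X = 0 ∨ wifiRange_alt N S X = 1 := by
  unfold wifiRange_alt
  dsimp only
  split
  · exact Or.inl rfl
  · split
    · exact Or.inr rfl
    · exact Or.inl rfl

-- ===== VERDICT (by name: the statement is the Claim_ definition above) =====
theorem wifiRange_spec : Claim_equal_wifiRange := by
  intro N S X _ _
  unfold Spec_wifiRange
  by_cases hc : Covers N S X
  · rw [(A_eq_one_iff N S X).mpr ((CondA_iff N S X).mpr hc),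
        (B_eq_one_iff N S X).mpr hc]
  · have hA : wifiRange N S X = 0 := by
      rcases A_zero_or_one N S X with h | h
      · exact h
      · exact absurd ((CondA_iff N S X).mp ((A_eq_one_iff N S X).mp h)) hc
    have hB : wifiRange_alt N S X = 0 := by
      rcases B_zero_or_one N S X with h | h
      · exact h
      · exact absurd ((B_eq_one_iff N S X).mp h) hc
    rw [hA, hB]
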